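-- pv_equiv track=rewrite | github.com/MrBrantCode/unitest_baseline | mut_generate/mist_train_taco/taco_6335/solution.py | max_zebra_length
-- ===== SOURCE A (Python) =====
-- def max_zebra_length(s: str) -> int:
--     def check_longest(zebra: str) -> int:
--         longest = 0
--         curr = 0
--         prev = 0
--         for i in zebra:
--             if ord(i) != prev:
--                 curr += 1
--             else:
--                 if curr > longest:
--                     longest = curr
--                 curr = 1
--             prev = ord(i)
--         if curr > longest:
--             longest = curr
--         return longest
--
--     def finish(zebra: str, longest: int) -> int:
--         temp = check_longest(zebra)
--         if temp > longest:
--             return temp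
--         else:
--             return longest
--
--     def flip(string: str) -> int:
--         start = string[0]
--         prev = start
--         for i in range(1, len(string)):
--             if string[i] == prev:
--                 if start != string[-1]:
--                     string = string[0:i][::-1] + string[:i - 1:-1]
--                     return flip(string)
--                 else:
--                     return finish(string, longest)
--             prev = string[i]
--         return finish(string, longest)
--
--     length = len(s)
--     longest = check_longest(s)
--
--     if longest == length:
--         return longest
--     if longest == length - 1:
--         if s[0] == s[-1]:
--             return longest
--         else:
--             return longest + 1
--
--     return flip(s)
-- ===== SOURCE B (Python) =====
-- def longest_run(z):
--     best, start = 0, 0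
--     for i, (x, y) in enumerate(zip(z, z[1:]), 1):
--         if x == y:
--             best = max(best, i - start)
--             start = i
--     return max(best, len(z) - start)
--
--
-- def max_zebra_length(s: str) -> int:
--     n = len(s)
--     base = longest_run(s)
--     if base >= n - 1:
--         return n if (base == n - 1 and s[0] != s[-1]) else base
--     cur = s
--     while True:
--         i = next((j for j, (x, y) in enumerate(zip(cur, cur[1:]), 1) if x == y), None)
--         if i is None or cur[0] == cur[-1]:
--             return max(base, longest_run(cur))
--         cur = cur[i - 1::-1] + cur[:i - 1:-1]
-- ===== Notes on version B (the rewrite author's own statement) =====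
-- stated objective: alternative
-- what changed: The pancake-flip recursion is rewritten as an iterative while-loop over a mutating string (no recursion depth), the run-length scan carries (best, start-of-run) over enumerate(zip(s, s[1:]), 1) instead of A's (longest, curr, prev-ord) fold with ord() comparisons, the first-duplicate search is a generator over zipped adjacent pairs instead of an indexed loop with a carried prev, and the three top-level branches are collapsed into one comparison base >= n-1.
import Mathlib
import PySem

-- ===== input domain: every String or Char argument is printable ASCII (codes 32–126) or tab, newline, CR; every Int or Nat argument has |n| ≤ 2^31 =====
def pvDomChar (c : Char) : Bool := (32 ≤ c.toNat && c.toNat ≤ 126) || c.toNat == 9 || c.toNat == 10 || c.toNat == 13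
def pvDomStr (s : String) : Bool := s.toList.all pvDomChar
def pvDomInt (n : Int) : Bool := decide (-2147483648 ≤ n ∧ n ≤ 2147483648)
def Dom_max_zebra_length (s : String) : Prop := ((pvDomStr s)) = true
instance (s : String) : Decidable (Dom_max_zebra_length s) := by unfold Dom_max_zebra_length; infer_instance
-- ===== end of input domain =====

-- B replaces the recursive pancake-flip with an iterative loop and a different run scan
-- (enumerate over zipped adjacent pairs carrying (best, start) instead of (longest, curr, prev)).

-- ===== PORT A =====
-- shared helpers: ord, and the duplicate-adjacent-pair count dc, used only as the fuel
-- bound of the flip loop in both ports (each flip strictly decreases dc, proved below).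

def zOrd (c : Char) : Int := (c.toNat : Int)   -- ord(c)

def dc : List Char → Nat
  | a :: b :: t => (if a = b then 1 else 0) + dc (b :: t)
  | _ => 0

-- check_longest: fold carrying (longest, curr, prev-ord)
def checkStep (st : Int × Int × Int) (c : Char) : Int × Int × Int :=
  if zOrd c ≠ st.2.2 then (st.1, st.2.1 + 1, zOrd c)
  else (if st.2.1 > st.1 then st.2.1 else st.1, 1, zOrd c)

def checkLongest (z : List Char) : Int :=
  let r := z.foldl checkStep (0, 0, 0)
  if r.2.1 > r.1 then r.2.1 else r.1

def finishA (z : List Char) (longest : Int) : Int :=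
  let temp := checkLongest z
  if temp > longest then temp else longest

-- the inner for-loop of flip: first index i ≥ 1 with string[i] == prev (prev carried);
-- the fuel argument (always called with s.length) only makes the index recursion structural.
def scanA (s : List Char) : Nat → Char → Nat → Option Nat
  | 0, _, _ => none
  | k+1, prev, i =>
    if h : i < s.length then
      if s[i] = prev then some i else scanA s k s[i] (i + 1)
    else none

-- flip (A): recursive, as in the Python; the fuel argument (called with dc s + 1, and never
-- exhausted because each flip strictly decreases dc) only makes the recursion structural.
def flipA : Nat → List Char → Int → Int
  | 0, s, longest => finishA s longest
  | fuel+1, s, longest =>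
    let start := PySem.List.pyGetD s 0 'A'      -- string[0]; dummy default 'A': flip is reached only with 3 ≤ len(string)
    match scanA s s.length start 1 with
    | none => finishA s longest
    | some i =>
      if start ≠ PySem.List.pyGetD s (-1) 'A' then
        flipA fuel (((PySem.List.slice? (PySem.List.slice s (some 0) (some (i : Int))) none none (-1)).getD [])
               ++ ((PySem.List.slice? s none (some ((i : Int) - 1)) (-1)).getD [])) longest
      else finishA s longest

def max_zebra_length (s : String) : Int :=
  let length : Int := PySem.Str.len s
  let longest := checkLongest s.toList
  if longest = length then longest
  else if longest = length - 1 then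
    (if PySem.Str.pyGet? s 0 = PySem.Str.pyGet? s (-1) then longest else longest + 1)
  else flipA (dc s.toList + 1) s.toList longest

-- ===== PORT B =====
-- longest_run: fold over enumerate(zip(z, z[1:]), 1) carrying (best, start)
def runStep (st : Int × Int) (p : Int × Char × Char) : Int × Int :=
  if p.2.1 = p.2.2 then (max st.1 (p.1 - st.2), p.1) else st

def longestRun (z : List Char) : Int :=
  let r := (PySem.List.enumerate (z.zip z.tail) 1).foldl runStep (0, 0)
  max r.1 ((z.length : Int) - r.2)

-- next((j for j, (x, y) in enumerate(zip(cur, cur[1:]), 1) if x == y), None)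
def firstDup (z : List Char) : Option Int :=
  ((PySem.List.enumerate (z.zip z.tail) 1).find? (fun p => p.2.1 == p.2.2)).map (·.1)

-- the while-loop of B, with the same structural fuel guard (called with dc cur + 1)
def flipB : Nat → List Char → Int → Int
  | 0, cur, base => max base (longestRun cur)
  | fuel+1, cur, base =>
    match firstDup cur with
    | none => max base (longestRun cur)
    | some i =>
      if PySem.List.pyGetD cur 0 'A' = PySem.List.pyGetD cur (-1) 'A' then
        max base (longestRun cur)
      else
        flipB fuel (((PySem.List.slice? cur (some (i - 1)) none (-1)).getD [])
               ++ ((PySem.List.slice? cur none (some (i - 1)) (-1)).getD [])) base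

def max_zebra_length_alt (s : String) : Int :=
  let n : Int := PySem.Str.len s
  let base := longestRun s.toList
  if n - 1 ≤ base then
    (if base = n - 1 ∧ PySem.Str.pyGet? s 0 ≠ PySem.Str.pyGet? s (-1) then n else base)
  else flipB (dc s.toList + 1) s.toList base

-- ===== PRECONDITION & SPEC =====
def Spec_max_zebra_length (s : String) (out : Int) : Prop := out = max_zebra_length_alt s
instance (s : String) (out : Int) : Decidable (Spec_max_zebra_length s out) := by unfold Spec_max_zebra_length; infer_instance

-- ===== CLAIM (what is proved, stated in full; the proofs are below) =====
def Claim_equal_max_zebra_length : Prop := ∀ (s : String), Dom_max_zebra_length s → Spec_max_zebra_length s (max_zebra_length s)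

-- ===== LEMMAS AND PROOFS =====

def junc : Option Char → Option Char → Nat
  | some a, some b => if a = b then 1 else 0
  | _, _ => 0

lemma junc_comm (x y : Option Char) : junc x y = junc y x := by
  cases x <;> cases y <;> simp [junc, eq_comm]

lemma dc_cons (a : Char) (t : List Char) : dc (a :: t) = junc (some a) t.head? + dc t := by
  cases t <;> simp [dc, junc]

lemma dc_append (xs ys : List Char) :
    dc (xs ++ ys) = dc xs + dc ys + junc xs.getLast? ys.head? := by
  induction xs with
  | nil => simp [dc, junc]
  | cons a t ih =>
    cases t with
    | nil =>
      rw [show ([a] ++ ys) = a :: ys from rfl, dc_cons a ys]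
      have h1 : dc [a] = 0 := rfl
      have h2 : ([a] : List Char).getLast? = some a := rfl
      rw [h1, h2]
      omega
    | cons b t' =>
      rw [show ((a :: b :: t') ++ ys) = a :: ((b :: t') ++ ys) from rfl]
      rw [dc_cons a ((b :: t') ++ ys), ih, dc_cons a (b :: t')]
      have hh : ((b :: t') ++ ys).head? = (b :: t').head? := rfl
      rw [hh, List.getLast?_cons_cons]
      omega

lemma dc_reverse (xs : List Char) : dc xs.reverse = dc xs := by
  induction xs with
  | nil => rfl
  | cons a t ih =>
    cases t with
    | nil => rfl
    | cons b t' =>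
      rw [show (a :: b :: t').reverse = (b :: t').reverse ++ [a] by simp]
      rw [dc_append, ih, List.getLast?_reverse, dc_cons a (b :: t')]
      have h1 : dc [a] = 0 := rfl
      have h2 : ([a] : List Char).head? = some a := rfl
      rw [h1, h2, junc_comm]
      omega

lemma take_getLast? (z : List Char) (j : Nat) (h1 : 1 ≤ j) (h2 : j ≤ z.length) :
    (z.take j).getLast? = z[j-1]? := by
  rw [List.getLast?_eq_getElem?]
  have hlen : (z.take j).length = j := by simp; omega
  rw [hlen, List.getElem?_take_of_lt (by omega)]

lemma drop_getLast? (z : List Char) (j : Nat) (h : j < z.length) :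
    (z.drop j).getLast? = z.getLast? := by
  rw [List.getLast?_eq_getElem?, List.getLast?_eq_getElem?, List.length_drop, List.getElem?_drop]
  congr 1
  omega

lemma take_head? (z : List Char) (j : Nat) (h1 : 1 ≤ j) :
    (z.take j).head? = z.head? := by
  rw [List.head?_eq_getElem?, List.head?_eq_getElem?, List.getElem?_take_of_lt (by omega)]

lemma dc_split (z : List Char) (j : Nat) (h1 : 1 ≤ j) (h2 : j < z.length)
    (hd : z[j]? = z[j-1]?) :
    dc z = dc (z.take j) + dc (z.drop j) + 1 := by
  conv_lhs => rw [← List.take_append_drop j z]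
  rw [dc_append, take_getLast? z j h1 (by omega)]
  have hhead : (z.drop j).head? = z[j]? := List.head?_drop
  rw [hhead, hd]
  have : z[j-1]? = some (z[j-1]'(by omega)) := List.getElem?_eq_getElem (by omega)
  rw [this]
  simp [junc]

lemma dc_transform_lt (z : List Char) (j : Nat) (h1 : 1 ≤ j) (h2 : j < z.length)
    (hd : z[j]? = z[j-1]?) (hne : z.head? ≠ z.getLast?) :
    dc ((z.take j).reverse ++ (z.drop j).reverse) < dc z := by
  rw [dc_append, dc_reverse, dc_reverse]
  rw [List.getLast?_reverse, List.head?_reverse, take_head? z j h1, drop_getLast? z j h2]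
  have hj : junc z.head? z.getLast? = 0 := by
    cases hh : z.head? with
    | none => simp [junc]
    | some a =>
      cases hg : z.getLast? with
      | none => simp [junc]
      | some b =>
        have : a ≠ b := by intro h; apply hne; rw [hh, hg, h]
        simp [junc, this]
  rw [hj, dc_split z j h1 h2 hd]
  omega

lemma filterMap_range_neg_one (xs : List Char) (S : Int) (sIdx m : Nat) (hS : S = (sIdx : Int))
    (hs : sIdx < xs.length) (hm : m ≤ sIdx + 1) :
    List.filterMap (fun k : Nat => xs[(S + -(k : Int)).toNat]?) (List.range m)
      = ((xs.drop (sIdx + 1 - m)).take m).reverse := by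
  induction m with
  | zero => simp
  | succ m ih =>
    rw [List.range_succ, List.filterMap_append, ih (by omega)]
    have hsm : sIdx - m < xs.length := by omega
    have hstep : (xs.drop (sIdx + 1 - (m+1))).take (m+1)
        = xs[sIdx - m]'hsm :: (xs.drop (sIdx + 1 - m)).take m := by
      rw [show sIdx + 1 - (m+1) = sIdx - m by omega, List.drop_eq_getElem_cons hsm,
          show (sIdx - m) + 1 = sIdx + 1 - m by omega, List.take_succ_cons]
    have hone : List.filterMap (fun k : Nat => xs[(S + -(k : Int)).toNat]?) [m]
        = [xs[sIdx - m]'hsm] := by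
      simp only [List.filterMap_cons, List.filterMap_nil]
      rw [show (S + -(m : Int)).toNat = sIdx - m by omega,
          List.getElem?_eq_getElem hsm]
    rw [hone, hstep]
    simp

lemma slice?_to_neg_one (xs : List Char) (b : Nat) (hb : b < xs.length) :
    PySem.List.slice? xs none (some (b : Int)) (-1) = some ((xs.drop (b+1)).reverse) := by
  simp only [PySem.List.slice?, PySem.List.sliceIndices]
  norm_num
  rw [if_neg (by omega : ¬ ((b : Int) < 0)), min_eq_left (by omega : (b : Int) ≤ (xs.length : Int) - 1)]
  rcases Nat.lt_or_ge (b+1) xs.length with hlt | hge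
  · rw [if_pos (by omega : (b : Int) < (xs.length : Int) - 1)]
    rw [show ((xs.length : Int) - 1 - (b : Int)).toNat = xs.length - 1 - b by omega]
    rw [filterMap_range_neg_one xs ((xs.length : Int) - 1) (xs.length - 1) (xs.length - 1 - b)
      (by omega) (by omega) (by omega)]
    rw [show xs.length - 1 + 1 - (xs.length - 1 - b) = b + 1 by omega]
    rw [List.take_of_length_le (by rw [List.length_drop]; omega)]
  · rw [if_neg (by omega : ¬ ((b : Int) < (xs.length : Int) - 1))]
    rw [List.drop_eq_nil_of_le (by omega)]
    simp

lemma slice?_from_neg_one (xs : List Char) (a : Nat) (ha : a < xs.length) :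
    PySem.List.slice? xs (some (a : Int)) none (-1) = some ((xs.take (a+1)).reverse) := by
  simp only [PySem.List.slice?, PySem.List.sliceIndices]
  norm_num
  rw [if_neg (by omega : ¬ ((a : Int) < 0)), min_eq_left (by omega : (a : Int) ≤ (xs.length : Int) - 1)]
  rw [if_pos (by omega : (-1 : Int) < (a : Int))]
  rw [show ((a : Int) + 1).toNat = a + 1 by omega]
  rw [filterMap_range_neg_one xs ((a : Nat) : Int) a (a+1) rfl ha (by omega)]
  rw [show a + 1 - (a + 1) = 0 by omega, List.drop_zero]

lemma transformA_eq (s : List Char) (i : Nat) (h1 : 1 ≤ i) (h2 : i < s.length) :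
    ((PySem.List.slice? (PySem.List.slice s (some 0) (some (i : Int))) none none (-1)).getD [])
      ++ ((PySem.List.slice? s none (some ((i : Int) - 1)) (-1)).getD [])
    = (s.take i).reverse ++ (s.drop i).reverse := by
  have e1 : PySem.List.slice s (some 0) (some (i : Int)) = s.take i := by
    rw [PySem.List.slice_zero_start, PySem.List.slice_to_natCast]
  have e2 : PySem.List.slice? (s.take i) none none (-1) = some (s.take i).reverse :=
    PySem.List.slice?_none_none_neg_one _
  have e4 : PySem.List.slice? s none (some ((i : Int) - 1)) (-1) = some ((s.drop i).reverse) := by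
    rw [show ((i : Int) - 1) = ((i - 1 : Nat) : Int) by omega,
        slice?_to_neg_one s (i-1) (by omega), show (i - 1) + 1 = i by omega]
  rw [e1, e2, e4]
  rfl

lemma transformB_eq (s : List Char) (i : Nat) (h1 : 1 ≤ i) (h2 : i < s.length) :
    ((PySem.List.slice? s (some ((i : Int) - 1)) none (-1)).getD [])
      ++ ((PySem.List.slice? s none (some ((i : Int) - 1)) (-1)).getD [])
    = (s.take i).reverse ++ (s.drop i).reverse := by
  have e1 : PySem.List.slice? s (some ((i : Int) - 1)) none (-1) = some ((s.take i).reverse) := by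
    rw [show ((i : Int) - 1) = ((i - 1 : Nat) : Int) by omega,
        slice?_from_neg_one s (i-1) (by omega), show (i - 1) + 1 = i by omega]
  have e2 : PySem.List.slice? s none (some ((i : Int) - 1)) (-1) = some ((s.drop i).reverse) := by
    rw [show ((i : Int) - 1) = ((i - 1 : Nat) : Int) by omega,
        slice?_to_neg_one s (i-1) (by omega), show (i - 1) + 1 = i by omega]
  rw [e1, e2]
  rfl

def auxScan : List Char → Char → Nat → Option Nat
  | [], _, _ => none
  | c :: cs, prev, i => if c = prev then some i else auxScan cs c (i + 1)

lemma scanA_eq_auxScan (s : List Char) : ∀ (k i : Nat) (prev : Char), s.length ≤ i + k →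
    scanA s k prev i = auxScan (s.drop i) prev i := by
  intro k
  induction k with
  | zero =>
    intro i prev hk
    rw [List.drop_eq_nil_of_le (by omega)]
    rfl
  | succ k ih =>
    intro i prev hk
    simp only [scanA]
    by_cases hlt : i < s.length
    · rw [dif_pos hlt, List.drop_eq_getElem_cons hlt]
      simp only [auxScan]
      by_cases he : s[i] = prev
      · rw [if_pos he, if_pos he]
      · rw [if_neg he, if_neg he]
        exact ih (i+1) s[i] (by omega)
    · rw [dif_neg hlt, List.drop_eq_nil_of_le (by omega)]
      rfl

lemma auxScan_spec (s : List Char) : ∀ (i j : Nat) (prev : Char),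
    auxScan (s.drop i) prev i = some j →
    i ≤ j ∧ j < s.length ∧ s[j]? = (if j = i then some prev else s[j-1]?) := by
  have H : ∀ (n i j : Nat) (prev : Char), s.length - i = n →
      auxScan (s.drop i) prev i = some j →
      i ≤ j ∧ j < s.length ∧ s[j]? = (if j = i then some prev else s[j-1]?) := by
    intro n
    induction n using Nat.strong_induction_on with
    | _ n ih =>
      intro i j prev hn h
      by_cases hlt : i < s.length
      · rw [List.drop_eq_getElem_cons hlt] at h
        simp only [auxScan] at h
        by_cases he : s[i] = prev
        · rw [if_pos he] at h
          injection h with h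
          subst h
          refine ⟨le_refl _, hlt, ?_⟩
          rw [if_pos rfl, List.getElem?_eq_getElem hlt, he]
        · rw [if_neg he] at h
          obtain ⟨h1, h2, h3⟩ := ih (s.length - (i+1)) (by omega) (i+1) j s[i] rfl h
          refine ⟨by omega, h2, ?_⟩
          rw [if_neg (by omega)]
          by_cases hji : j = i + 1
          · rw [if_pos hji] at h3
            rw [h3, show j - 1 = i by omega, List.getElem?_eq_getElem hlt]
          · rw [if_neg hji] at h3
            exact h3
      · rw [List.drop_eq_nil_of_le (by omega)] at h
        simp [auxScan] at h
  exact fun i j prev => H (s.length - i) i j prev rfl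

lemma scanA_first (s : List Char) (d : Char) (j : Nat)
    (h : scanA s s.length (PySem.List.pyGetD s 0 d) 1 = some j) :
    1 ≤ j ∧ j < s.length ∧ s[j]? = s[j-1]? := by
  rw [scanA_eq_auxScan s s.length 1 _ (by omega)] at h
  obtain ⟨h1, h2, h3⟩ := auxScan_spec s 1 j _ h
  refine ⟨h1, h2, ?_⟩
  by_cases hj : j = 1
  · rw [if_pos hj] at h3
    have hs : 0 < s.length := by omega
    cases s with
    | nil => simp at hs
    | cons c t =>
      rw [PySem.List.pyGetD_zero_cons] at h3
      rw [h3, hj]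
      rfl
  · rw [if_neg hj] at h3
    exact h3

lemma ends_ne (s : List Char) (d : Char) (hs : s ≠ [])
    (hne : PySem.List.pyGetD s 0 d ≠ PySem.List.pyGetD s (-1) d) :
    s.head? ≠ s.getLast? := by
  intro hcon
  apply hne
  cases s with
  | nil => exact absurd rfl hs
  | cons a t =>
    rw [PySem.List.pyGetD_zero_cons, PySem.List.pyGetD_neg_one (a :: t) d hs]
    have hh : (a :: t).head? = some a := rfl
    have hg : (a :: t).getLast? = some ((a :: t).getLast hs) := List.getLast?_eq_some_getLast hs
    rw [hh, hg] at hcon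
    exact Option.some.inj hcon


lemma if_gt_eq_max (a b : Int) : (if b > a then b else a) = max a b := by
  split <;> omega

lemma zOrd_eq_iff (a b : Char) : zOrd a = zOrd b ↔ a = b := by
  unfold zOrd
  constructor
  · intro h
    have h2 : a.toNat = b.toNat := by exact_mod_cast h
    first
      | exact Char.toNat_inj.mp h2
      | exact Char.eq_of_toNat_eq h2
      | { apply Char.ext; exact UInt32.toNat_inj.mp h2 }
  · intro h; rw [h]

def finPartA (r : Int × Int × Int) : Int := if r.2.1 > r.1 then r.2.1 else r.1
def finPartB (n : Int) (q : Int × Int) : Int := max q.1 (n - q.2)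

-- the two run scans agree (A carries (longest, curr, prev); B carries (best, start))
lemma fold_link (rest : List Char) : ∀ (p : Char) (i best start : Int),
    finPartA (rest.foldl checkStep (best, i - start, zOrd p))
      = finPartB (i + (rest.length : Int))
          (((PySem.List.enumerate ((p :: rest).zip rest) i)).foldl runStep (best, start)) := by
  induction rest with
  | nil =>
    intro p i best start
    simp only [List.zip_nil_right, PySem.List.enumerate_nil, List.foldl_nil,
      finPartA, finPartB, List.length_nil]
    rw [if_gt_eq_max]
    norm_num
  | cons q rest' ih =>
    intro p i best start
    rw [List.zip_cons_cons, PySem.List.enumerate_cons, List.foldl_cons, List.foldl_cons]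
    by_cases hpq : q = p
    · have hA : checkStep (best, i - start, zOrd p) q = (max best (i - start), 1, zOrd q) := by
        dsimp only [checkStep]
        rw [if_neg (not_not_intro (by rw [hpq])), if_gt_eq_max]
      have hB : runStep (best, start) ((i : Int), p, q) = (max best (i - start), i) := by
        dsimp only [runStep]
        rw [if_pos hpq.symm]
      have ih' := ih q (i+1) (max best (i - start)) i
      rw [show (i+1) - i = (1 : Int) by ring] at ih'
      rw [hA, hB, ih']
      dsimp only [finPartB]
      simp only [List.length_cons]
      push_cast
      congr 1
      omega
    · have hA : checkStep (best, i - start, zOrd p) q = (best, (i + 1) - start, zOrd q) := by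
        dsimp only [checkStep]
        rw [if_pos (by simp only [ne_eq, zOrd_eq_iff]; exact hpq)]
        rw [show (i - start) + 1 = (i + 1) - start by ring]
      have hB : runStep (best, start) ((i : Int), p, q) = (best, start) := by
        dsimp only [runStep]
        rw [if_neg (fun hcon => hpq hcon.symm)]
      rw [hA, hB, ih q (i+1) best start]
      dsimp only [finPartB]
      simp only [List.length_cons]
      push_cast
      congr 1
      omega

lemma checkLongest_eq_longestRun (z : List Char) : checkLongest z = longestRun z := by
  cases z with
  | nil => decide
  | cons c rest =>
    have h0 : checkStep (0, 0, 0) c = (0, 1, zOrd c) := by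
      simp only [checkStep]
      split <;> norm_num
    have hlink := fold_link rest c 1 0 0
    simp only [checkLongest, longestRun, List.foldl_cons, h0]
    rw [show (1 : Int) - 0 = 1 by ring] at hlink
    rw [show ((c :: rest).tail) = rest from rfl]
    calc (if ((rest.foldl checkStep (0, 1, zOrd c)).2.1 > (rest.foldl checkStep (0, 1, zOrd c)).1)
            then (rest.foldl checkStep (0, 1, zOrd c)).2.1 else (rest.foldl checkStep (0, 1, zOrd c)).1)
        = finPartA (rest.foldl checkStep (0, 1, zOrd c)) := rfl
      _ = finPartB (1 + (rest.length : Int))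
            (((PySem.List.enumerate ((c :: rest).zip rest) 1)).foldl runStep (0, 0)) := hlink
      _ = _ := by
            dsimp only [finPartB]
            simp only [List.length_cons]
            push_cast
            congr 1
            omega

lemma runFold_bound (l : List (Char × Char)) : ∀ (i best start : Int),
    0 ≤ start → start ≤ i - 1 → best ≤ i - 1 →
    ((PySem.List.enumerate l i).foldl runStep (best, start)).1 ≤ i + (l.length : Int) - 1
    ∧ 0 ≤ ((PySem.List.enumerate l i).foldl runStep (best, start)).2 := by
  induction l with
  | nil =>
    intro i best start h1 h2 h3
    simp only [PySem.List.enumerate_nil, List.foldl_nil, List.length_nil]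
    constructor <;> push_cast <;> omega
  | cons pr l' ih =>
    intro i best start h1 h2 h3
    rw [PySem.List.enumerate_cons, List.foldl_cons]
    by_cases hd : pr.1 = pr.2
    · have hstep : runStep (best, start) (i, pr) = (max best (i - start), i) := by
        simp [runStep, hd]
      rw [hstep]
      have := ih (i+1) (max best (i - start)) i (by omega) (by omega) (by omega)
      simp only [List.length_cons]
      push_cast
      push_cast at this
      omega
    · have hstep : runStep (best, start) (i, pr) = (best, start) := by
        simp [runStep, hd]
      rw [hstep]
      have := ih (i+1) best start h1 (by omega) (by omega)
      simp only [List.length_cons]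
      push_cast
      push_cast at this
      omega

lemma longestRun_le (z : List Char) : longestRun z ≤ (z.length : Int) := by
  cases z with
  | nil => decide
  | cons c rest =>
    have hb := runFold_bound ((c :: rest).zip rest) 1 0 0 (by norm_num) (by norm_num) (by norm_num)
    rw [List.length_zip, List.length_cons] at hb
    simp only [longestRun, show ((c :: rest).tail) = rest from rfl, List.length_cons]
    push_cast at hb ⊢
    omega

lemma finishA_eq (z : List Char) (L : Int) : finishA z L = max L (longestRun z) := by
  simp only [finishA]
  rw [checkLongest_eq_longestRun, if_gt_eq_max]

lemma find_eq_auxScan (rest : List Char) : ∀ (p : Char) (i : Nat),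
    (((PySem.List.enumerate ((p :: rest).zip rest) ((i : Nat) : Int)).find?
        (fun q => q.2.1 == q.2.2)).map (·.1))
      = (auxScan rest p i).map (fun n : Nat => (n : Int)) := by
  induction rest with
  | nil => intro p i; simp [auxScan]
  | cons q rest' ih =>
    intro p i
    rw [List.zip_cons_cons, PySem.List.enumerate_cons, List.find?_cons]
    by_cases hpq : p = q
    · subst hpq
      have hb : ((((i : Nat) : Int), p, p).2.1 == (((i : Nat) : Int), p, p).2.2) = true := by simp
      rw [hb]
      simp [auxScan]
    · have hb : ((((i : Nat) : Int), p, q).2.1 == (((i : Nat) : Int), p, q).2.2) = false := by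
        simp [hpq]
      rw [hb]
      dsimp only
      rw [show (((i : Nat) : Int) + 1) = (((i + 1 : Nat)) : Int) by push_cast; ring]
      rw [ih q (i + 1)]
      simp only [auxScan]
      rw [if_neg (fun hcon : q = p => hpq hcon.symm)]

lemma firstDup_eq_scanA (z : List Char) :
    firstDup z = (scanA z z.length (PySem.List.pyGetD z 0 'A') 1).map (fun n : Nat => (n : Int)) := by
  cases z with
  | nil =>
    simp [firstDup, scanA]
  | cons c rest =>
    unfold firstDup
    rw [PySem.List.pyGetD_zero_cons, scanA_eq_auxScan (c :: rest) (c :: rest).length 1 c (by omega)]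
    rw [show ((c :: rest).drop 1) = rest from rfl, show ((c :: rest).tail) = rest from rfl]
    exact_mod_cast find_eq_auxScan rest c 1

-- fuel-indexed equivalence of the two flip loops
lemma flip_eq : ∀ (fuel : Nat) (z : List Char) (L : Int), dc z < fuel →
    flipA fuel z L = flipB fuel z L := by
  intro fuel
  induction fuel with
  | zero => intro z L h; omega
  | succ fuel ih =>
    intro z L hfuel
    simp only [flipA, flipB]
    cases hscan : scanA z z.length (PySem.List.pyGetD z 0 'A') 1 with
    | none =>
      have hfd : firstDup z = none := by rw [firstDup_eq_scanA, hscan]; rfl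
      simp only [hfd]
      rw [finishA_eq]
    | some i =>
      have hfd : firstDup z = some ((i : Nat) : Int) := by rw [firstDup_eq_scanA, hscan]; rfl
      obtain ⟨h1, h2, h3⟩ := scanA_first z 'A' i hscan
      have hz : z ≠ [] := by intro hnil; subst hnil; simp at h2
      simp only [hfd]
      by_cases hends : PySem.List.pyGetD z 0 'A' = PySem.List.pyGetD z (-1) 'A'
      · rw [if_neg (not_not_intro hends), if_pos hends, finishA_eq]
      · rw [if_pos hends, if_neg hends]
        rw [transformA_eq z i h1 h2, transformB_eq z i h1 h2]
        have hlt := dc_transform_lt z i h1 h2 h3 (ends_ne z 'A' hz hends)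
        exact ih _ L (by omega)

-- ===== VERDICT (by name: the statement is the Claim_ definition above) =====
theorem max_zebra_length_spec : Claim_equal_max_zebra_length := by
  intro s _hdom
  unfold Spec_max_zebra_length max_zebra_length max_zebra_length_alt
  simp only []
  rw [checkLongest_eq_longestRun]
  have hle0 : longestRun s.toList ≤ PySem.Str.len s := by
    rw [PySem.Str.len_eq]
    exact_mod_cast longestRun_le s.toList
  generalize hV : longestRun s.toList = v at *
  generalize hN : PySem.Str.len s = n at *
  by_cases hA1 : v = n
  · have hb1 : n - 1 ≤ v := by omega
    have hb2 : ¬(v = n - 1 ∧ PySem.Str.pyGet? s 0 ≠ PySem.Str.pyGet? s (-1)) := by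
      rintro ⟨hc, _⟩
      omega
    rw [if_pos hA1, if_pos hb1, if_neg hb2]
  · by_cases hA2 : v = n - 1
    · rw [if_neg hA1, if_pos hA2, if_pos (by omega : n - 1 ≤ v)]
      by_cases hend : PySem.Str.pyGet? s 0 = PySem.Str.pyGet? s (-1)
      · have hb2 : ¬(v = n - 1 ∧ PySem.Str.pyGet? s 0 ≠ PySem.Str.pyGet? s (-1)) := by
          rintro ⟨_, hc⟩
          exact hc hend
        rw [if_pos hend, if_neg hb2]
      · rw [if_neg hend, if_pos ⟨hA2, hend⟩]
        omega
    · rw [if_neg hA1, if_neg hA2, if_neg (by omega : ¬ (n - 1 ≤ v))]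
      exact flip_eq (dc s.toList + 1) s.toList v (by omega)
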